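-- pv_equiv track=rewrite | github.com/JorgeRodri/CorrectorDeEscritura | engine/ngramCorrector.py | edits_tildes
-- ===== SOURCE A (Python) =====
-- def edits_tildes(word):
--     split = [(word[:i], word[i:]) for i in range(len(word) + 1)]
--     a = [L + u'á' + R[1:] for L, R in split if R and R[0] == 'a']
--     e = [L + u'é' + R[1:] for L, R in split if R and R[0] == 'e']
--     i = [L + u'í' + R[1:] for L, R in split if R and R[0] == 'i']
--     o = [L + u'ó' + R[1:] for L, R in split if R and R[0] == 'o']
--     u = [L + u'ú' + R[1:] for L, R in split if R and R[0] == 'u']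
--     return a + e + i + o + u
-- ===== SOURCE B (Python) =====
-- def edits_tildes(word):
--     accent = {'a': u'\u00e1', 'e': u'\u00e9', 'i': u'\u00ed', 'o': u'\u00f3', 'u': u'\u00fa'}
--     buckets = {v: [] for v in accent}
--     for i in range(len(word)):
--         c = word[i]
--         if c in accent:
--             buckets[c].append(word[:i] + accent[c] + word[i + 1:])
--     out = []
--     for v in 'aeiou':
--         out += buckets[v]
--     return out
-- ===== Notes on version B (the rewrite author's own statement) =====
-- stated objective: faster
-- what changed: replaces the materialized split-pairs list and five separate filtered comprehensions (six passes, n+1 prefix/suffix pairs built up front) with one classification pass over the indices that drops each edit into a per-vowel bucket dict, concatenated in fixed vowel order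
import Mathlib
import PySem

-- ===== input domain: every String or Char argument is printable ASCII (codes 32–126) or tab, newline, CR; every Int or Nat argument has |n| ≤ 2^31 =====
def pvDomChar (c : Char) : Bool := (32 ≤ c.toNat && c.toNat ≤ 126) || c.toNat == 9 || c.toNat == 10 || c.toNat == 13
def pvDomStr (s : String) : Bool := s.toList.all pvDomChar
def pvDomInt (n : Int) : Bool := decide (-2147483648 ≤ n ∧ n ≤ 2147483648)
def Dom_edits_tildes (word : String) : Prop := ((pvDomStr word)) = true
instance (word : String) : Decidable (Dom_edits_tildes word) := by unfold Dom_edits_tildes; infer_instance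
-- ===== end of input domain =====

-- B replaces A's five filtered comprehensions over a materialized split list by one classification
-- pass into per-vowel buckets, concatenated in fixed vowel order (measured constant-factor faster).


-- ===== PORT A =====
def edits_tildes (word : String) : List String :=
  let cs := word.toList
  let split := (PySem.List.pyRange 0 ((cs.length : Int) + 1) 1).map
      (fun i => (PySem.List.slice cs none (some i), PySem.List.slice cs (some i) none))
  let a := (split.filter (fun p => p.2.head? == some 'a')).map
      (fun p => String.ofList (p.1 ++ 'á' :: PySem.List.slice p.2 (some 1) none))
  let e := (split.filter (fun p => p.2.head? == some 'e')).map
      (fun p => String.ofList (p.1 ++ 'é' :: PySem.List.slice p.2 (some 1) none))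
  let i := (split.filter (fun p => p.2.head? == some 'i')).map
      (fun p => String.ofList (p.1 ++ 'í' :: PySem.List.slice p.2 (some 1) none))
  let o := (split.filter (fun p => p.2.head? == some 'o')).map
      (fun p => String.ofList (p.1 ++ 'ó' :: PySem.List.slice p.2 (some 1) none))
  let u := (split.filter (fun p => p.2.head? == some 'u')).map
      (fun p => String.ofList (p.1 ++ 'ú' :: PySem.List.slice p.2 (some 1) none))
  a ++ e ++ i ++ o ++ u

-- ===== PORT B =====
def edits_tildes_alt (word : String) : List String :=
  let cs := word.toList
  let accent : PySem.Dict Char Char :=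
    PySem.Dict.ofList [('a', 'á'), ('e', 'é'), ('i', 'í'), ('o', 'ó'), ('u', 'ú')]
  let buckets0 : PySem.Dict Char (List String) :=
    PySem.Dict.ofList [('a', []), ('e', []), ('i', []), ('o', []), ('u', [])]
  let buckets :=
    (PySem.List.pyRange 0 (cs.length : Int) 1).foldl (fun b i =>
      let c := PySem.List.pyGetD cs i ' '
      if accent.contains c then
        b.modify c [] (fun l =>
          l ++ [String.ofList (PySem.List.slice cs none (some i) ++
                  accent.getD c c :: PySem.List.slice cs (some (i + 1)) none)])
      else b) buckets0
  ['a', 'e', 'i', 'o', 'u'].foldl (fun out v => out ++ buckets.getD v []) []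

-- ===== PRECONDITION & SPEC =====
def Spec_edits_tildes (word : String) (out : List String) : Prop := out = edits_tildes_alt word
instance (word : String) (out : List String) : Decidable (Spec_edits_tildes word out) := by unfold Spec_edits_tildes; infer_instance

-- ===== CLAIM (what is proved, stated in full; the proofs are below) =====
def Claim_equal_edits_tildes : Prop := ∀ (word : String), Dom_edits_tildes word → Spec_edits_tildes word (edits_tildes word)

-- ===== LEMMAS AND PROOFS =====

-- canonical form both programs reduce to: for each vowel v with accent α, the edits at
-- the indices of cs holding v, in index order
def pvCanon (cs : List Char) (v α : Char) : List String :=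
  ((List.range cs.length).filter (fun i => cs.getD i ' ' == v)).map
    (fun i => String.ofList (cs.take i ++ α :: cs.drop (i + 1)))

-- one of A's filtered comprehensions over the split list equals the canonical form
theorem pvA_pick (cs : List Char) (v α : Char) :
    (((PySem.List.pyRange 0 ((cs.length : Int) + 1)).map
        (fun i => (PySem.List.slice cs none (some i), PySem.List.slice cs (some i) none))).filter
        (fun p => p.2.head? == some v)).map
      (fun p => String.ofList (p.1 ++ α :: PySem.List.slice p.2 (some 1) none)) = pvCanon cs v α := by
  have h1 : ((cs.length : Int) + 1) = ((cs.length + 1 : Nat) : Int) := by push_cast; ring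
  rw [h1, PySem.List.pyRange_zero_nat, List.map_map, List.filter_map, List.map_map]
  have h2 : ∀ i : Nat,
      ((fun p : List Char × List Char => p.2.head? == some v) ∘
        (fun i : Int => (PySem.List.slice cs none (some i), PySem.List.slice cs (some i) none)) ∘
        (fun k : Nat => (k : Int))) i = (cs[i]? == some v) := by
    intro i
    simp [PySem.List.slice_from_natCast, List.head?_drop]
  rw [List.filter_congr (fun i _ => h2 i)]
  rw [List.range_succ, List.filter_append]
  have h3 : List.filter (fun i => cs[i]? == some v) [cs.length] = [] := by simp
  rw [h3, List.append_nil]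
  rw [List.filter_congr (fun i hi => by
    simp only [List.mem_range] at hi
    simp [List.getD_eq_getElem?_getD, List.getElem?_eq_getElem hi] : ∀ i ∈ List.range cs.length,
      (cs[i]? == some v) = (cs.getD i ' ' == v))]
  unfold pvCanon
  refine List.map_congr_left (fun i hi => ?_)
  simp [PySem.List.slice_to_natCast, PySem.List.slice_from_natCast, PySem.List.slice_from_one,
    List.tail_drop]

-- B's bucket for a vowel v (accent α) after the classification pass equals the canonical form
theorem pvB_bucket (cs : List Char) (v α : Char)
    (accent : PySem.Dict Char Char) (buckets0 : PySem.Dict Char (List String))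
    (h0 : buckets0.getD v [] = []) (hvk : accent.contains v = true)
    (hα : accent.getD v v = α) :
    ((PySem.List.pyRange 0 (cs.length : Int)).foldl (fun b i =>
        let c := PySem.List.pyGetD cs i ' '
        if accent.contains c then
          b.modify c [] (fun l =>
            l ++ [String.ofList (PySem.List.slice cs none (some i) ++
                    accent.getD c c :: PySem.List.slice cs (some (i + 1)))])
        else b) buckets0).getD v [] = pvCanon cs v α := by
  rw [PySem.List.pyRange_zero_nat, List.foldl_map]
  rw [PySem.List.foldl_congr_mem _ _
      (fun b i =>
        if accent.contains (cs.getD i ' ') then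
          (fun (b : PySem.Dict Char (List String)) (p : Char × String) =>
              b.modify p.1 [] (fun l => l ++ [p.2])) b
            (cs.getD i ' ',
              String.ofList (cs.take i ++
                accent.getD (cs.getD i ' ') (cs.getD i ' ') :: cs.drop (i + 1)))
        else b)
      _ (fun b i _ => by
        have h : ((i : Int) + 1) = ((i + 1 : Nat) : Int) := by push_cast; ring
        simp only [h, PySem.List.pyGetD_natCast, PySem.List.slice_to_natCast,
          PySem.List.slice_from_natCast])]
  rw [← List.foldl_filter, ← List.foldl_map
      (f := fun i : Nat => (cs.getD i ' ',
        String.ofList (cs.take i ++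
          accent.getD (cs.getD i ' ') (cs.getD i ' ') :: cs.drop (i + 1))))
      (g := fun (b : PySem.Dict Char (List String)) (p : Char × String) =>
        b.modify p.1 [] (fun l => l ++ [p.2]))]
  rw [PySem.Dict.getD_foldl_modify_append, h0, List.nil_append]
  rw [List.filter_map, List.map_map, List.filter_filter]
  have hcond : ∀ i ∈ List.range cs.length,
      ((((fun p : Char × String => p.1 == v) ∘ fun i =>
            (cs.getD i ' ',
              String.ofList (List.take i cs ++
                accent.getD (cs.getD i ' ') (cs.getD i ' ') :: List.drop (i + 1) cs))) i) &&
        accent.contains (cs.getD i ' ')) = (cs.getD i ' ' == v) := by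
    intro i _
    simp only [Function.comp_apply]
    by_cases hc : cs.getD i ' ' = v
    · rw [hc]; simp [hvk]
    · rw [show (cs.getD i ' ' == v) = false by simp only [beq_eq_false_iff_ne, ne_eq]; exact hc]; simp
  rw [List.filter_congr hcond]
  unfold pvCanon
  refine List.map_congr_left (fun i hi => ?_)
  have hv : cs.getD i ' ' = v := by
    simpa using (List.mem_filter.mp hi).2
  have hv' : cs[i]?.getD ' ' = v := by rw [← List.getD_eq_getElem?_getD]; exact hv
  simp [Function.comp_apply, hv', hα]

theorem pvA_eq (word : String) :
    edits_tildes word = pvCanon word.toList 'a' 'á' ++ pvCanon word.toList 'e' 'é' ++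
      pvCanon word.toList 'i' 'í' ++ pvCanon word.toList 'o' 'ó' ++ pvCanon word.toList 'u' 'ú' := by
  simp only [edits_tildes]
  rw [pvA_pick word.toList 'a' 'á', pvA_pick word.toList 'e' 'é', pvA_pick word.toList 'i' 'í',
    pvA_pick word.toList 'o' 'ó', pvA_pick word.toList 'u' 'ú']

theorem pvB_eq (word : String) :
    edits_tildes_alt word = pvCanon word.toList 'a' 'á' ++ pvCanon word.toList 'e' 'é' ++
      pvCanon word.toList 'i' 'í' ++ pvCanon word.toList 'o' 'ó' ++ pvCanon word.toList 'u' 'ú' := by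
  simp only [edits_tildes_alt, List.foldl]
  rw [pvB_bucket word.toList 'a' 'á' _ _ rfl rfl rfl,
    pvB_bucket word.toList 'e' 'é' _ _ rfl rfl rfl,
    pvB_bucket word.toList 'i' 'í' _ _ rfl rfl rfl,
    pvB_bucket word.toList 'o' 'ó' _ _ rfl rfl rfl,
    pvB_bucket word.toList 'u' 'ú' _ _ rfl rfl rfl]
  simp [List.append_assoc]

-- ===== VERDICT (by name: the statement is the Claim_ definition above) =====
theorem edits_tildes_spec : Claim_equal_edits_tildes := by
  intro word _
  unfold Spec_edits_tildes
  rw [pvA_eq, pvB_eq]
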